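-- pv_equiv track=rewrite | github.com/levani-b/leetcode-solutions | LC-3712-SumOfElementsWithFrequencyDivisibleByK.py | sumDivisibleByK
-- ===== SOURCE A (Python) =====
-- from typing import List
--
-- def sumDivisibleByK(nums: List[int], k: int) -> int:
--     freq = {}
--     for num in nums:
--         if num in freq:
--             freq[num] += 1
--         else:
--             freq[num] = 1
--
--     sum = 0
--
--     for num, count in freq.items():
--         if count % k == 0:
--             sum += num * count
--
--     return sum
-- ===== SOURCE B (Python) =====
-- from typing import List
--
-- def sumDivisibleByK(nums: List[int], k: int) -> int:
--     s = sorted(nums)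
--     n = len(s)
--     total = 0
--     i = 0
--     while i < n:
--         j = i
--         while j < n and s[j] == s[i]:
--             j += 1
--         run = j - i
--         if run % k == 0:
--             total += s[i] * run
--         i = j
--     return total
-- ===== Notes on version B (the rewrite author's own statement) =====
-- stated objective: alternative
-- what changed: Replaces the hash frequency map plus a second pass over its items by sorting a copy of nums and summing value*run_length over maximal runs of equal consecutive values in one scan.
import Mathlib
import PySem

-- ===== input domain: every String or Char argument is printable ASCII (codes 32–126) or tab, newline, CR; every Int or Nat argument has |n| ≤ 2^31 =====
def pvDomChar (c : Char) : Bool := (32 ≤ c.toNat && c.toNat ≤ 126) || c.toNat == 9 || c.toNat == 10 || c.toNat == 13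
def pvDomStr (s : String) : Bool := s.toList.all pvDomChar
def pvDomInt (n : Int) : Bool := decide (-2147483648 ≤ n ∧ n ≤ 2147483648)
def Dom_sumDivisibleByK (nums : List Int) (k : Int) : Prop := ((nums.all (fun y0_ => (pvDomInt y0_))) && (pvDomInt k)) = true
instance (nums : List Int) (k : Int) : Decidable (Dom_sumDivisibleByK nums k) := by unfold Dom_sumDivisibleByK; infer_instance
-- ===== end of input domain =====

-- B replaces A's hash frequency map + items pass by sorting a copy of nums and summing
-- value*run_length over maximal runs of equal consecutive values in one scan (alternative algorithm).

-- ===== PORT A =====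
-- freq = {}; for num in nums: freq[num] = freq[num]+1 if present else 1
-- then sum num*count over items with count % k == 0
def sumDivisibleByK (nums : List Int) (k : Int) : Int :=
  let freq : PySem.Dict Int Int :=
    nums.foldl (fun d num =>
      if d.contains num then d.insert num (d.getD num 0 + 1) else d.insert num 1)
      PySem.Dict.empty
  freq.items.foldl (fun s p => if PySem.Int.mod p.2 k = 0 then s + p.1 * p.2 else s) 0

-- ===== PORT B =====
-- the inner 'while s[j] == s[i]' advance is takeWhile/dropWhile on the tail
def pvSumRuns (l : List Int) (k : Int) : Int :=
  match l with
  | [] => 0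
  | x :: rest =>
      let run : Int := 1 + (rest.takeWhile (fun y => y == x)).length
      (if PySem.Int.mod run k = 0 then x * run else 0)
        + pvSumRuns (rest.dropWhile (fun y => y == x)) k
termination_by l.length
decreasing_by
  simpa using Nat.lt_succ_of_le (List.Sublist.length_le (List.dropWhile_sublist _))

def sumDivisibleByK_alt (nums : List Int) (k : Int) : Int :=
  pvSumRuns (PySem.List.sorted nums (fun x => x) false) k

-- ===== PRECONDITION & SPEC =====
-- Pre_ excludes only the ZeroDivisionError case: k = 0 with nums non-empty (both A and B raise there).
def Pre_sumDivisibleByK (nums : List Int) (k : Int) : Prop := nums = [] ∨ k ≠ 0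
instance (nums : List Int) (k : Int) : Decidable (Pre_sumDivisibleByK nums k) := by
  unfold Pre_sumDivisibleByK; infer_instance

def pvWitness_sumDivisibleByK : List Int × Int := ([2, -1, 2, 3, 3], 2)

def Spec_sumDivisibleByK (nums : List Int) (k : Int) (out : Int) : Prop := out = sumDivisibleByK_alt nums k
instance (nums : List Int) (k : Int) (out : Int) : Decidable (Spec_sumDivisibleByK nums k out) := by unfold Spec_sumDivisibleByK; infer_instance

-- ===== CLAIM (what is proved, stated in full; the proofs are below) =====
def Claim_equal_sumDivisibleByK : Prop := ∀ (nums : List Int) (k : Int), Dom_sumDivisibleByK nums k → Pre_sumDivisibleByK nums k → Spec_sumDivisibleByK nums k (sumDivisibleByK nums k)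

-- ===== LEMMAS AND PROOFS =====

-- the per-value summand both programs add for a distinct value v of l
def pvTerm (l : List Int) (k v : Int) : Int :=
  if PySem.Int.mod (l.count v : Int) k = 0 then v * (l.count v : Int) else 0

-- A's frequency loop is Counter(nums)
lemma pvFreq_eq_counter (nums : List Int) :
    nums.foldl (fun d num =>
      if d.contains num then d.insert num (d.getD num 0 + 1) else d.insert num 1)
      PySem.Dict.empty = PySem.Dict.counter nums := by
  rw [← PySem.Dict.foldl_insert_getD_add_one_eq_counter]
  apply PySem.List.foldl_congr_mem
  intro d x _
  by_cases h : d.contains x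
  · simp [h]
  · simp only [Bool.not_eq_true] at h
    simp [h, PySem.Dict.getD_of_not_contains d 0 h]

-- A computes the sum of pvTerm over the distinct values of nums
lemma pvA_eq_sum (nums : List Int) (k : Int) :
    sumDivisibleByK nums k = ((PySem.Set.ofList nums).map (pvTerm nums k)).sum := by
  unfold sumDivisibleByK
  dsimp only
  rw [pvFreq_eq_counter, PySem.Dict.items_counter]
  have hfun : (fun (s : Int) (p : Int × Int) => if PySem.Int.mod p.2 k = 0 then s + p.1 * p.2 else s)
      = fun s p => s + (if PySem.Int.mod p.2 k = 0 then p.1 * p.2 else 0) := by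
    funext s p; by_cases h : PySem.Int.mod p.2 k = 0 <;> simp [h]
  rw [hfun, PySem.List.foldl_add]
  simp only [List.map_map, zero_add]
  rfl

-- the dropWhile part of a ≤-sorted tail contains no copy of the head value
lemma pvDrop_not_mem (x : Int) (rest : List Int)
    (hp : (x :: rest).Pairwise (· ≤ ·)) :
    x ∉ rest.dropWhile (fun y => y == x) := by
  intro hx
  have hsub : (rest.dropWhile (fun y => y == x)).Sublist rest := List.dropWhile_sublist _
  have hpd : (rest.dropWhile (fun y => y == x)).Pairwise (· ≤ ·) :=
    (List.pairwise_cons.mp hp).2.sublist hsub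
  cases hd : rest.dropWhile (fun y => y == x) with
  | nil => simp [hd] at hx
  | cons z t =>
    have hne : rest.dropWhile (fun y => y == x) ≠ [] := by simp [hd]
    have hz' := List.head_dropWhile_not (fun y => y == x) hne
    have hhead : (rest.dropWhile (fun y => y == x)).head hne = z := by simp [hd]
    rw [hhead] at hz'
    have hzx : z ≠ x := by simpa using hz'
    have hzr : z ∈ rest := hsub.mem (by rw [hd]; exact List.mem_cons_self)
    have hxz : x ≤ z := (List.pairwise_cons.mp hp).1 z hzr
    rw [hd] at hx hpd
    rcases List.mem_cons.mp hx with h | h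
    · exact hzx h.symm
    · have := (List.pairwise_cons.mp hpd).1 x h
      omega

-- counts: in x :: rest with t the ==x-prefix of rest, count x = 1 + |t| and other values count in the drop part
lemma pvCount_head (x : Int) (rest : List Int) (hp : (x :: rest).Pairwise (· ≤ ·)) :
    (x :: rest).count x = 1 + (rest.takeWhile (fun y => y == x)).length := by
  have hsplit := List.takeWhile_append_dropWhile (p := fun y => y == x) (l := rest)
  have htake : ∀ y ∈ rest.takeWhile (fun y => y == x), y = x := by
    intro y hy; simpa using List.mem_takeWhile_imp hy
  have hdrop := pvDrop_not_mem x rest hp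
  calc (x :: rest).count x = 1 + rest.count x := by rw [List.count_cons_self]; omega
    _ = 1 + ((rest.takeWhile (fun y => y == x)).count x
          + (rest.dropWhile (fun y => y == x)).count x) := by
        conv_lhs => rw [← hsplit]
        rw [List.count_append]
    _ = 1 + (rest.takeWhile (fun y => y == x)).length := by
        rw [List.count_eq_length.mpr (fun y hy => ((htake y hy) ▸ rfl : x = y)),
            List.count_eq_zero.mpr hdrop]
        omega

lemma pvCount_other (x v : Int) (rest : List Int) (hvx : v ≠ x) :
    (x :: rest).count v = (rest.dropWhile (fun y => y == x)).count v := by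
  have hsplit := List.takeWhile_append_dropWhile (p := fun y => y == x) (l := rest)
  have htake : (rest.takeWhile (fun y => y == x)).count v = 0 :=
    List.count_eq_zero.mpr (fun hv => hvx (by simpa using List.mem_takeWhile_imp hv))
  calc (x :: rest).count v = rest.count v := by rw [List.count_cons_of_ne hvx.symm]
    _ = (rest.takeWhile (fun y => y == x)).count v
          + (rest.dropWhile (fun y => y == x)).count v := by
        conv_lhs => rw [← hsplit]; rw [List.count_append]
    _ = (rest.dropWhile (fun y => y == x)).count v := by rw [htake]; omega

-- folding Set.add over a list avoiding x keeps a leading x in place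
lemma pvFoldl_add_cons (d : List Int) (s : List Int) (x : Int) (hx : x ∉ d) :
    d.foldl PySem.Set.add (x :: s) = x :: d.foldl PySem.Set.add s := by
  induction d generalizing s with
  | nil => rfl
  | cons y t ih =>
    have hyx : y ≠ x := fun h => hx (h ▸ List.mem_cons_self)
    have hxt : x ∉ t := fun h => hx (List.mem_cons_of_mem _ h)
    have hadd : PySem.Set.add (x :: s) y = x :: PySem.Set.add s y := by
      have hc : (x :: s).contains y = s.contains y := by
        rw [List.contains_cons]; simp [hyx]
      by_cases h : s.contains y = true <;>
        simp only [PySem.Set.add, PySem.Set.contains, hc, h, if_true, if_false,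
          Bool.false_eq_true, List.cons_append]
    rw [List.foldl_cons, List.foldl_cons, hadd, ih _ hxt]

-- distinct values of x :: rest (sorted) = x :: distinct values of the drop part
lemma pvOfList_cons (x : Int) (rest : List Int) (hp : (x :: rest).Pairwise (· ≤ ·)) :
    PySem.Set.ofList (x :: rest)
      = x :: PySem.Set.ofList (rest.dropWhile (fun y => y == x)) := by
  have hsplit := List.takeWhile_append_dropWhile (p := fun y => y == x) (l := rest)
  have htake : ∀ y ∈ rest.takeWhile (fun y => y == x), y = x := by
    intro y hy; simpa using List.mem_takeWhile_imp hy
  rw [PySem.Set.ofList_eq_foldl]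
  conv_lhs => rw [← hsplit]
  rw [List.foldl_cons, List.foldl_append]
  have h1 : PySem.Set.add ([] : PySem.Set Int) x = [x] := rfl
  rw [h1]
  have h2 : ∀ (T : List Int), (∀ y ∈ T, y = x) → T.foldl PySem.Set.add [x] = [x] := by
    intro T hT
    induction T with
    | nil => rfl
    | cons a t ih =>
      have ha : a = x := hT a (by simp)
      have hstep : PySem.Set.add [x] a = [x] := by
        simp [ha, PySem.Set.add, PySem.Set.contains]
      rw [List.foldl_cons, hstep]
      exact ih (fun y hy => hT y (by simp [hy]))
  rw [h2 _ htake, pvFoldl_add_cons _ _ _ (pvDrop_not_mem x rest hp), PySem.Set.ofList_eq_foldl]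

-- B's run scan computes the sum of pvTerm over the distinct values, for any ≤-sorted list
lemma pvB_eq_sum (l : List Int) (k : Int) (hp : l.Pairwise (· ≤ ·)) :
    pvSumRuns l k = ((PySem.Set.ofList l).map (pvTerm l k)).sum := by
  induction l using pvSumRuns.induct with
  | case1 => simp [pvSumRuns]
  | case2 x rest ih =>
    have hpd : (rest.dropWhile (fun y => y == x)).Pairwise (· ≤ ·) :=
      (List.pairwise_cons.mp hp).2.sublist (List.dropWhile_sublist _)
    rw [pvSumRuns, pvOfList_cons x rest hp, List.map_cons, List.sum_cons, ih hpd]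
    congr 1
    · have hc : ((x :: rest).count x : Int)
          = 1 + ((rest.takeWhile (fun y => y == x)).length : Int) := by
        rw [pvCount_head x rest hp]; push_cast; ring
      simp only [pvTerm]
      rw [hc]
    · congr 1
      apply List.map_congr_left
      intro v hv
      have hv' : v ∈ rest.dropWhile (fun y => y == x) := by
        simpa [PySem.Set.mem_ofList] using hv
      have hvx : v ≠ x := fun h => pvDrop_not_mem x rest hp (h ▸ hv')
      simp [pvTerm, pvCount_other x v rest hvx]

-- the distinct-value sum is invariant under permutation of the underlying list
lemma pvSum_perm (l₁ l₂ : List Int) (k : Int) (h : l₁.Perm l₂) :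
    ((PySem.Set.ofList l₁).map (pvTerm l₁ k)).sum
      = ((PySem.Set.ofList l₂).map (pvTerm l₂ k)).sum := by
  have hperm : (PySem.Set.ofList l₁).Perm (PySem.Set.ofList l₂) := by
    rw [List.perm_ext_iff_of_nodup (PySem.Set.nodup_ofList l₁) (PySem.Set.nodup_ofList l₂)]
    intro a
    rw [PySem.Set.mem_ofList, PySem.Set.mem_ofList]
    exact h.mem_iff
  have hterm : pvTerm l₁ k = pvTerm l₂ k := by
    funext v; simp [pvTerm, h.count_eq]
  rw [hterm]
  exact (hperm.map (pvTerm l₂ k)).sum_eq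

-- ===== VERDICT (by name: the statement is the Claim_ definition above) =====
theorem sumDivisibleByK_spec : Claim_equal_sumDivisibleByK := by
  intro nums k _ _
  show sumDivisibleByK nums k = sumDivisibleByK_alt nums k
  rw [pvA_eq_sum, sumDivisibleByK_alt,
      pvB_eq_sum _ k (by simpa using PySem.List.sorted_pairwise (xs := nums) (key := fun x => x)),
      pvSum_perm _ _ k (PySem.List.sorted_perm nums (fun x => x) false).symm]
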